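-- pv_equiv track=rewrite | github.com/bstrb/simSSED | notebooks/sort_stream.py | parse_stream
-- ===== SOURCE A (Python) =====
-- def parse_stream(stream_lines):
--     """
--     Parse the given stream file lines into three parts:
--     1. header_lines: all lines up until the first chunk begins.
--     2. chunks: a list of (event_number, chunk_lines) for each chunk.
--     3. trailer_lines: any lines after the last chunk ends (if any).
--     """
--     header_lines = []
--     trailer_lines = []
--     chunks = []
--
--     in_chunk = False
--     chunk_lines = []
--     event_number = None
--
--     # We need to detect the start and end of chunks.
--     # The chunk format is:
--     # ----- Begin chunk -----
--     # ...
--     # Event: //N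
--     # ...
--     # ----- End chunk -----
--
--     for line in stream_lines:
--         # Detect chunk boundaries
--         if line.strip() == "----- Begin chunk -----":
--             in_chunk = True
--             chunk_lines = [line]
--             event_number = None
--         elif line.strip() == "----- End chunk -----":
--             in_chunk = False
--             chunk_lines.append(line)
--             # Store the chunk with its event number
--             if event_number is None:
--                 event_number = 999999999
--             chunks.append((event_number, chunk_lines))
--             chunk_lines = []  # Reset chunk_lines after appending
--         else:
--             if in_chunk:
--                 chunk_lines.append(line)
--                 # Try to find the event number
--                 if "Event:" in line:
--                     parts = line.strip().split()
--                     for part in parts: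
--                         if part.startswith("//"):
--                             event_number = int(part.strip("/"))
--             else:
--                 if not chunks:  # Changed from len(chunks) == 0 for clarity
--                     header_lines.append(line)
--                 else:
--                     trailer_lines.append(line)
--
--     return header_lines, chunks, trailer_lines
-- ===== SOURCE B (Python) =====
-- BEGIN_MARK = "----- Begin chunk -----"
-- END_MARK = "----- End chunk -----"
--
--
-- def _split_at_begin(lines):
--     """Segment before the first Begin marker, the marker, and the remainder."""
--     for k, l in enumerate(lines):
--         if l.strip() == BEGIN_MARK:
--             return lines[:k], l, lines[k + 1:]
--     return lines, None, []
--
--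
-- def _split_at_marker(lines):
--     """Segment before the first Begin/End marker, the marker, and the remainder."""
--     for k, l in enumerate(lines):
--         s = l.strip()
--         if s == BEGIN_MARK or s == END_MARK:
--             return lines[:k], l, lines[k + 1:]
--     return lines, None, []
--
--
-- def _event_number(body):
--     """Event number of a chunk body: the last '//N' token of an 'Event:' line."""
--     ev = None
--     for line in body:
--         if "Event:" in line:
--             for part in line.strip().split():
--                 if part.startswith("//"):
--                     ev = int(part.strip("/"))
--     return 999999999 if ev is None else ev
--
--
-- def parse_stream(stream_lines):
--     # Recursive descent over marker-delimited segments: everything before the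
--     # first Begin is the header; each Begin is closed by the next marker line
--     # (a new Begin reopens the chunk, discarding the buffered lines; no closing
--     # marker discards the chunk); segments between chunks form the trailer.
--     header, b, rest = _split_at_begin(stream_lines)
--     chunks, trailer = [], []
--     while b is not None:
--         seg, m, rest = _split_at_marker(rest)
--         if m is None:
--             b = None  # unterminated chunk: discarded
--         elif m.strip() == END_MARK:
--             chunks.append((_event_number(seg), [b] + seg + [m]))
--             seg2, b, rest = _split_at_begin(rest)
--             trailer.extend(seg2)
--         else:
--             b = m  # chunk reopened
--     return header, chunks, trailer
-- ===== Notes on version B (the rewrite author's own statement) =====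
-- stated objective: alternative
-- what changed: Replaces A's single line-by-line loop with in_chunk/chunk_lines/event flag state by a recursive descent that repeatedly splits the stream at the next Begin/End marker line and handles a whole header segment, chunk span or trailer segment at once.
-- intended difference: On inputs with a stray '----- End chunk -----' line (no open Begin before it) A returns a phantom one-line chunk made of that marker alone, numbered with the previous chunk's event number or 999999999, while B treats the line as an ordinary header/trailer line, the intended reading of a spurious end-marker. — e.g. on parse_stream(["h", "----- End chunk -----", "t"]): A returns (["h"], [(999999999, ["----- End chunk -----"])], ["t"]), B returns (["h", "----- End chunk -----", "t"], [], [])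
import Mathlib
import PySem

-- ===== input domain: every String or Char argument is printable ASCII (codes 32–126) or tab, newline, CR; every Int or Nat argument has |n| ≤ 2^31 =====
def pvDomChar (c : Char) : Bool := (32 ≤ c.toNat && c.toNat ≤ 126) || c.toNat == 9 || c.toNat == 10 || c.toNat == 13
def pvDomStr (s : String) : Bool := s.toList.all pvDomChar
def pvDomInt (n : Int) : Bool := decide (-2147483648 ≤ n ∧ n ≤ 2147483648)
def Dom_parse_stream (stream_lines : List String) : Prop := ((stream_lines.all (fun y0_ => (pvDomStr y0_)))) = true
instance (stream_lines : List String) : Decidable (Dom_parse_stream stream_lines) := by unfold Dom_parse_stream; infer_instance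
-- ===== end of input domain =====

-- B re-implements A's flag-driven line loop as a recursive descent over
-- marker-delimited segments; objective: alternative decomposition. On inputs with
-- a stray End marker the two differ (see D_ below). No argument is mutated.

def beginMark : String := "----- Begin chunk -----"
def endMark : String := "----- End chunk -----"

-- per-line event scan, shared verbatim by both Pythons ('if "Event:" in line: …')
def findEvent (ev : Option Int) (line : String) : Option Int :=
  if PySem.Str.isIn "Event:" line then
    (PySem.Str.split₀ (PySem.Str.strip line)).foldl
      (fun e part =>
        if PySem.Str.startswith part "//" then
          -- int(part.strip("/")); Pre_ excludes the inputs where Python raises ValueError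
          some ((PySem.Int.ofStr? (PySem.Str.stripChars part "/")).getD 0)
        else e) ev
  else ev

-- ===== PORT A =====
structure AState where
  header : List String
  trailer : List String
  chunks : List (Int × List String)
  inChunk : Bool
  chunkLines : List String
  event : Option Int
deriving Repr, DecidableEq

def stepA (s : AState) (line : String) : AState :=
  if PySem.Str.strip line == beginMark then
    { s with inChunk := true, chunkLines := [line], event := none }
  else if PySem.Str.strip line == endMark then
    let ev := s.event.getD 999999999
    { s with inChunk := false,
             chunks := s.chunks ++ [(ev, s.chunkLines ++ [line])],
             chunkLines := [], event := some ev }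
  else if s.inChunk then
    { s with chunkLines := s.chunkLines ++ [line], event := findEvent s.event line }
  else if s.chunks.isEmpty then
    { s with header := s.header ++ [line] }
  else
    { s with trailer := s.trailer ++ [line] }

def parse_stream (stream_lines : List String) :
    List String × (List (Int × List String)) × List String :=
  let f := stream_lines.foldl stepA ⟨[], [], [], false, [], none⟩
  (f.header, f.chunks, f.trailer)

-- ===== PORT B =====
def isBeginLine (l : String) : Bool := PySem.Str.strip l == beginMark
def isMarkerLine (l : String) : Bool :=
  PySem.Str.strip l == beginMark || PySem.Str.strip l == endMark

-- common shape of Source B's _split_at_begin / _split_at_marker: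
-- (segment before the first line satisfying p, that line with its tail, if any)
def splitAtPred (p : String → Bool) : List String → List String × Option (String × List String)
  | [] => ([], none)
  | l :: ls =>
    if p l then ([], some (l, ls))
    else
      let r := splitAtPred p ls
      (l :: r.1, r.2)

def splitAtBegin : List String → List String × Option (String × List String) :=
  splitAtPred isBeginLine
def splitAtMarker : List String → List String × Option (String × List String) :=
  splitAtPred isMarkerLine

theorem splitAtPred_some_length {p : String → Bool} {ls a : List String} {m : String}
    {r : List String} (h : splitAtPred p ls = (a, some (m, r))) : r.length < ls.length := by
  induction ls generalizing a with
  | nil => simp [splitAtPred] at h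
  | cons x xs ih =>
    by_cases hx : p x
    · simp [splitAtPred, hx] at h
      simp [h.2.2]
    · simp only [splitAtPred, hx, Bool.false_eq_true, ite_false] at h
      have h2 : splitAtPred p xs = ((splitAtPred p xs).1, some (m, r)) := by
        have := congrArg Prod.snd h
        simp at this
        rw [Prod.ext_iff]; simp [this]
      exact Nat.lt_succ_of_lt (ih h2)

-- _event_number of a chunk body
def eventNum (body : List String) : Int :=
  (body.foldl findEvent none).getD 999999999

def goB (b : String) (rest : List String) (chunks : List (Int × List String))
    (trailer : List String) : List (Int × List String) × List String :=
  match h : splitAtMarker rest with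
  | (_, none) => (chunks, trailer)            -- unterminated chunk: discarded
  | (seg, some (m, rest2)) =>
    have h1 : rest2.length < rest.length := splitAtPred_some_length h
    if PySem.Str.strip m == endMark then
      let chunks' := chunks ++ [(eventNum seg, b :: (seg ++ [m]))]
      match h2 : splitAtBegin rest2 with
      | (seg2, none) => (chunks', trailer ++ seg2)
      | (seg2, some (b2, rest3)) =>
        have : rest3.length < rest.length :=
          Nat.lt_trans (splitAtPred_some_length h2) h1
        goB b2 rest3 chunks' (trailer ++ seg2)
    else goB m rest2 chunks trailer           -- chunk reopened
termination_by rest.length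

def parse_stream_alt (stream_lines : List String) :
    List String × (List (Int × List String)) × List String :=
  match splitAtBegin stream_lines with
  | (hdr, none) => (hdr, [], [])
  | (hdr, some (b, rest)) =>
    let ct := goB b rest [] []
    (hdr, ct.1, ct.2)

-- ===== PRECONDITION & SPEC =====
-- does int() succeed on every '//'-token of an in-chunk line containing "Event:"?
def tokensOk (line : String) : Bool :=
  !(PySem.Str.isIn "Event:" line) ||
  (PySem.Str.split₀ (PySem.Str.strip line)).all
    (fun p => !(PySem.Str.startswith p "//") ||
              (PySem.Int.ofStr? (PySem.Str.stripChars p "/")).isSome)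

-- line i is processed 'in chunk' iff the nearest preceding marker line is a Begin
def inChunkCtx (ls : List String) (i : Nat) : Bool :=
  match ((ls.take i).reverse.find? isMarkerLine) with
  | some m => PySem.Str.strip m == beginMark
  | none => false

-- Pre_ excludes exactly the inputs on which A raises ValueError: a line inside a
-- chunk that contains "Event:" and a '//'-token whose strip('/') is not an int.
def Pre_parse_stream (stream_lines : List String) : Prop :=
  ∀ i : Fin stream_lines.length,
    inChunkCtx stream_lines i = true → tokensOk stream_lines[i] = true
instance (stream_lines : List String) : Decidable (Pre_parse_stream stream_lines) := by
  unfold Pre_parse_stream; infer_instance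

def pvWitness_parse_stream : List String :=
  ["run header", "----- Begin chunk -----", "Event: //7", "data",
   "----- End chunk -----", "tail"]

-- marker-structure scan of the input: is some End marker line not inside an
-- open Begin…? (state = 'a Begin is currently open')
def strayEndScan : List String → Bool → Bool
  | [], _ => false
  | l :: ls, inC =>
    if PySem.Str.strip l == beginMark then strayEndScan ls true
    else if PySem.Str.strip l == endMark then
      if inC then strayEndScan ls false else true
    else strayEndScan ls inC

-- On inputs containing a stray '----- End chunk -----' line (no open Begin before
-- it) A returns a phantom one-line chunk made of that marker alone (numbered with
-- the previous chunk's event number, or 999999999); B treats the line as an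
-- ordinary header/trailer line, which is the intended reading of a spurious
-- end-marker in a stream.
def D_parse_stream (stream_lines : List String) : Prop :=
  strayEndScan stream_lines false = true
instance (stream_lines : List String) : Decidable (D_parse_stream stream_lines) := by
  unfold D_parse_stream; infer_instance

def Spec_parse_stream (stream_lines : List String) (out : List String × (List (Int × List String)) × List String) : Prop := ¬ D_parse_stream stream_lines → out = parse_stream_alt stream_lines
instance (stream_lines : List String) (out : List String × (List (Int × List String)) × List String) : Decidable (Spec_parse_stream stream_lines out) := by unfold Spec_parse_stream; infer_instance

def pvDiffWitness_parse_stream : List String := ["h", "----- End chunk -----", "t"]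
def pvDiffWitnessOut_parse_stream :
    (List String × (List (Int × List String)) × List String) ×
    (List String × (List (Int × List String)) × List String) :=
  ((["h"], [(999999999, ["----- End chunk -----"])], ["t"]),
   (["h", "----- End chunk -----", "t"], [], []))

-- ===== CLAIM (what is proved, stated in full; the proofs are below) =====
def Claim_unchanged_parse_stream : Prop := ∀ (stream_lines : List String), Dom_parse_stream stream_lines → Pre_parse_stream stream_lines → Spec_parse_stream stream_lines (parse_stream stream_lines)
def Claim_changed_parse_stream : Prop := Dom_parse_stream (pvDiffWitness_parse_stream) ∧ Pre_parse_stream (pvDiffWitness_parse_stream) ∧ D_parse_stream (pvDiffWitness_parse_stream) ∧ parse_stream (pvDiffWitness_parse_stream) = pvDiffWitnessOut_parse_stream.1 ∧ parse_stream_alt (pvDiffWitness_parse_stream) = pvDiffWitnessOut_parse_stream.2 ∧ pvDiffWitnessOut_parse_stream.1 ≠ pvDiffWitnessOut_parse_stream.2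
def Claim_exact_parse_stream : Prop := ∀ (stream_lines : List String), Dom_parse_stream stream_lines → Pre_parse_stream stream_lines → D_parse_stream stream_lines → parse_stream stream_lines ≠ parse_stream_alt stream_lines

-- ===== LEMMAS AND PROOFS =====

theorem splitAtPred_none {p : String → Bool} {ls a : List String}
    (h : splitAtPred p ls = (a, none)) :
    a = ls ∧ ∀ x ∈ ls, p x = false := by
  induction ls generalizing a with
  | nil => simp [splitAtPred] at h; simp [h]
  | cons x xs ih =>
    by_cases hx : p x
    · simp [splitAtPred, hx] at h
    · simp only [splitAtPred, hx, Bool.false_eq_true, ite_false] at h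
      have h2 : splitAtPred p xs = ((splitAtPred p xs).1, none) := by
        have := congrArg Prod.snd h
        simp at this
        rw [Prod.ext_iff]; simp [this]
      obtain ⟨ha, hall⟩ := ih h2
      have := congrArg Prod.fst h
      simp at this
      constructor
      · rw [← this, ha]
      · intro y hy
        rcases List.mem_cons.mp hy with hy | hy
        · simpa [hy] using hx
        · exact hall y hy

theorem splitAtPred_some {p : String → Bool} {ls a : List String} {m : String}
    {r : List String} (h : splitAtPred p ls = (a, some (m, r))) :
    ls = a ++ m :: r ∧ (∀ x ∈ a, p x = false) ∧ p m = true := by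
  induction ls generalizing a with
  | nil => simp [splitAtPred] at h
  | cons x xs ih =>
    by_cases hx : p x
    · simp [splitAtPred, hx] at h
      obtain ⟨ha, hm, hr⟩ := h
      subst ha hm hr; simpa using hx
    · simp only [splitAtPred, hx, Bool.false_eq_true, ite_false] at h
      have h2 : splitAtPred p xs = ((splitAtPred p xs).1, some (m, r)) := by
        have := congrArg Prod.snd h
        simp at this
        rw [Prod.ext_iff]; simp [this]
      obtain ⟨hxs, hall, hm⟩ := ih h2
      have hfst := congrArg Prod.fst h
      simp at hfst
      refine ⟨?_, ?_, hm⟩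
      · rw [← hfst]; simp [← hxs]
      · intro y hy
        rw [← hfst] at hy
        rcases List.mem_cons.mp hy with hy | hy
        · simpa [hy] using hx
        · exact hall y hy

theorem run_hdr (seg : List String) (hseg : ∀ x ∈ seg, isMarkerLine x = false)
    (h : List String) (ev : Option Int) :
    List.foldl stepA ⟨h, [], [], false, [], ev⟩ seg = ⟨h ++ seg, [], [], false, [], ev⟩ := by
  induction seg generalizing h with
  | nil => simp
  | cons y ys ih =>
    have hy := hseg y (List.mem_cons_self ..)
    simp only [isMarkerLine, Bool.or_eq_false_iff] at hy
    simp only [List.foldl_cons, stepA, hy.1, hy.2, Bool.false_eq_true, ite_false,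
      List.isEmpty_nil, ite_true]
    rw [ih (fun x hx => hseg x (List.mem_cons_of_mem _ hx))]
    simp

theorem run_trl (seg : List String) (hseg : ∀ x ∈ seg, isMarkerLine x = false)
    (h t : List String) (c : List (Int × List String)) (hc : c ≠ [])
    (ev : Option Int) :
    List.foldl stepA ⟨h, t, c, false, [], ev⟩ seg = ⟨h, t ++ seg, c, false, [], ev⟩ := by
  induction seg generalizing t with
  | nil => simp
  | cons y ys ih =>
    have hy := hseg y (List.mem_cons_self ..)
    simp only [isMarkerLine, Bool.or_eq_false_iff] at hy
    have hce : c.isEmpty = false := by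
      cases c with
      | nil => exact absurd rfl hc
      | cons a l => rfl
    simp only [List.foldl_cons, stepA, hy.1, hy.2, Bool.false_eq_true, ite_false, hce]
    rw [ih (fun x hx => hseg x (List.mem_cons_of_mem _ hx))]
    simp

theorem run_in (seg : List String) (hseg : ∀ x ∈ seg, isMarkerLine x = false)
    (h t : List String) (c : List (Int × List String)) (cl : List String)
    (ev : Option Int) :
    List.foldl stepA ⟨h, t, c, true, cl, ev⟩ seg
      = ⟨h, t, c, true, cl ++ seg, seg.foldl findEvent ev⟩ := by
  induction seg generalizing cl ev with
  | nil => simp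
  | cons y ys ih =>
    have hy := hseg y (List.mem_cons_self ..)
    simp only [isMarkerLine, Bool.or_eq_false_iff] at hy
    simp only [List.foldl_cons, stepA, hy.1, hy.2, Bool.false_eq_true, ite_false, ite_true]
    rw [ih (fun x hx => hseg x (List.mem_cons_of_mem _ hx))]
    simp

theorem stray_append (seg ys : List String) (hseg : ∀ x ∈ seg, isMarkerLine x = false)
    (c : Bool) : strayEndScan (seg ++ ys) c = strayEndScan ys c := by
  induction seg with
  | nil => simp
  | cons x xs ih =>
    have hx := hseg x (List.mem_cons_self ..)
    simp only [isMarkerLine, Bool.or_eq_false_iff] at hx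
    simp only [List.cons_append, strayEndScan, hx.1, hx.2, Bool.false_eq_true, ite_false]
    exact ih (fun y hy => hseg y (List.mem_cons_of_mem _ hy))

-- a Begin-free segment scanned with no open chunk contains no End either (¬D_)
theorem noBegin_noEnd (a ys : List String) (hb : ∀ x ∈ a, isBeginLine x = false)
    (h : strayEndScan (a ++ ys) false = false) :
    ∀ x ∈ a, isMarkerLine x = false := by
  induction a with
  | nil => simp
  | cons x xs ih =>
    have hx := hb x (List.mem_cons_self ..)
    have hnb : (PySem.Str.strip x == beginMark) = false := by simpa [isBeginLine] using hx
    by_cases he : (PySem.Str.strip x == endMark) = true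
    · rw [List.cons_append] at h
      simp [strayEndScan, hnb, he] at h
    · have he' : (PySem.Str.strip x == endMark) = false := by simpa using he
      have h' : strayEndScan (xs ++ ys) false = false := by
        rw [List.cons_append] at h
        simpa [strayEndScan, hnb, he'] using h
      intro y hy
      rcases List.mem_cons.mp hy with hy | hy
      · subst hy; simp [isMarkerLine, hnb, he']
      · exact ih (fun z hz => hb z (List.mem_cons_of_mem _ hz)) h' y hy

-- under ¬D_ (from state 'no open chunk'), the segment before the first Begin
-- contains no marker at all
theorem splitAtBegin_markerless {ls a : List String}
    {o : Option (String × List String)} (hstray : strayEndScan ls false = false)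
    (h : splitAtBegin ls = (a, o)) : ∀ x ∈ a, isMarkerLine x = false := by
  cases o with
  | none =>
    obtain ⟨ha, hnb⟩ := splitAtPred_none h
    subst ha
    exact noBegin_noEnd a [] hnb (by simpa using hstray)
  | some p =>
    obtain ⟨hls, hnb, _⟩ := splitAtPred_some h
    exact noBegin_noEnd a (p.1 :: p.2) hnb (by rw [← hls]; exact hstray)

theorem goB_spec (b : String) (rest : List String)
    (chunks : List (Int × List String)) (trailer : List String) :
    ∀ (h : List String), strayEndScan rest true = false →
    (fun s : AState => (s.header, s.chunks, s.trailer))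
        (List.foldl stepA ⟨h, trailer, chunks, true, [b], none⟩ rest)
      = (h, (goB b rest chunks trailer).1, (goB b rest chunks trailer).2) := by
  induction b, rest, chunks, trailer using goB.induct with
  | case1 b rest chunks trailer seg hsplit =>
    intro h _
    obtain ⟨_, hnomark⟩ := splitAtPred_none hsplit
    rw [run_in rest hnomark, goB.eq_def]
    split
    next hs1 => simp
    next sx mx rx hs1 => rw [hsplit] at hs1; simp_all
  | case2 b rest chunks trailer seg m rest2 hsplit hlen hE seg2 hsplit2 =>
    intro h hstray
    obtain ⟨hrest, hnomark, _⟩ := splitAtPred_some hsplit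
    subst hrest
    have heq : PySem.Str.strip m = endMark := by simpa using hE
    have hnb : (PySem.Str.strip m == beginMark) = false := by
      simp [heq, endMark, beginMark]
    rw [stray_append seg _ hnomark] at hstray
    have hstray2 : strayEndScan rest2 false = false := by
      simpa [strayEndScan, hnb, hE] using hstray
    obtain ⟨hr2, _⟩ := splitAtPred_none hsplit2
    subst hr2
    have hnomark2 := splitAtBegin_markerless hstray2 hsplit2
    simp only [List.foldl_append, List.foldl_cons]
    rw [run_in seg hnomark]
    have hstep : stepA ⟨h, trailer, chunks, true, [b] ++ seg, List.foldl findEvent none seg⟩ m =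
        ⟨h, trailer,
         chunks ++ [((List.foldl findEvent none seg).getD 999999999, ([b] ++ seg) ++ [m])],
         false, [], some ((List.foldl findEvent none seg).getD 999999999)⟩ := by
      simp [stepA, hnb, hE]
    rw [hstep, run_trl seg2 hnomark2 h trailer
      (chunks ++ [((List.foldl findEvent none seg).getD 999999999, [b] ++ seg ++ [m])])
      (by simp) (some ((List.foldl findEvent none seg).getD 999999999)), goB.eq_def]
    split
    next hs1 => rw [hsplit] at hs1; simp_all
    next sx mx rx hs1 =>
      rw [hsplit] at hs1
      simp only [Prod.mk.injEq, Option.some.injEq] at hs1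
      obtain ⟨g1, g2, g3⟩ := hs1
      subst g1; subst g2; subst g3
      simp only [hE, if_true]
      split
      next hs2 => rw [hsplit2] at hs2; simp_all [eventNum]
      next hs2 => rw [hsplit2] at hs2; simp_all
  | case3 b rest chunks trailer seg m rest2 hsplit hlen hE chunks' seg2 b2 rest3 hsplit2 hlen2 ih =>
    intro h hstray
    obtain ⟨hrest, hnomark, _⟩ := splitAtPred_some hsplit
    subst hrest
    have heq : PySem.Str.strip m = endMark := by simpa using hE
    have hnb : (PySem.Str.strip m == beginMark) = false := by
      simp [heq, endMark, beginMark]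
    rw [stray_append seg _ hnomark] at hstray
    have hstray2 : strayEndScan rest2 false = false := by
      simpa [strayEndScan, hnb, hE] using hstray
    obtain ⟨hr2, _, hb2⟩ := splitAtPred_some hsplit2
    have hnomark2 := splitAtBegin_markerless hstray2 hsplit2
    have hb2' : (PySem.Str.strip b2 == beginMark) = true := by
      simpa [isBeginLine] using hb2
    have hstray3 : strayEndScan rest3 true = false := by
      rw [hr2, stray_append seg2 _ hnomark2] at hstray2
      simpa [strayEndScan, hb2'] using hstray2
    simp only [List.foldl_append, List.foldl_cons]
    rw [run_in seg hnomark]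
    have hstep : stepA ⟨h, trailer, chunks, true, [b] ++ seg, List.foldl findEvent none seg⟩ m =
        ⟨h, trailer,
         chunks ++ [((List.foldl findEvent none seg).getD 999999999, ([b] ++ seg) ++ [m])],
         false, [], some ((List.foldl findEvent none seg).getD 999999999)⟩ := by
      simp [stepA, hnb, hE]
    rw [hstep]
    conv_lhs => rw [hr2]
    rw [List.foldl_append, run_trl seg2 hnomark2 h trailer
      (chunks ++ [((List.foldl findEvent none seg).getD 999999999, [b] ++ seg ++ [m])])
      (by simp) (some ((List.foldl findEvent none seg).getD 999999999)), List.foldl_cons]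
    have hstep2 : stepA ⟨h, trailer ++ seg2,
        chunks ++ [((List.foldl findEvent none seg).getD 999999999, ([b] ++ seg) ++ [m])],
        false, [], some ((List.foldl findEvent none seg).getD 999999999)⟩ b2 =
        ⟨h, trailer ++ seg2,
         chunks ++ [((List.foldl findEvent none seg).getD 999999999, ([b] ++ seg) ++ [m])],
         true, [b2], none⟩ := by
      simp [stepA, hb2']
    rw [hstep2, goB.eq_def]
    split
    next hs1 => rw [hsplit] at hs1; simp_all
    next sx mx rx hs1 =>
      rw [hsplit] at hs1
      simp only [Prod.mk.injEq, Option.some.injEq] at hs1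
      obtain ⟨g1, g2, g3⟩ := hs1
      subst g1; subst g2; subst g3
      simp only [hE, if_true]
      split
      next hs2 => rw [hsplit2] at hs2; simp_all
      next sx2 mx2 rx2 hs2 =>
        rw [hsplit2] at hs2
        simp only [Prod.mk.injEq, Option.some.injEq] at hs2
        obtain ⟨g1, g2, g3⟩ := hs2
        subst g1; subst g2; subst g3
        exact ih h hstray3
  | case4 b rest chunks trailer seg m rest2 hsplit hlen hnE ih =>
    intro h hstray
    obtain ⟨hrest, hnomark, hm⟩ := splitAtPred_some hsplit
    subst hrest
    have hb : (PySem.Str.strip m == beginMark) = true := by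
      simp only [isMarkerLine, Bool.or_eq_true] at hm
      rcases hm with hbm | he
      · exact hbm
      · exact absurd he (by simpa using hnE)
    rw [stray_append seg _ hnomark] at hstray
    have hstray2 : strayEndScan rest2 true = false := by
      simpa [strayEndScan, hb] using hstray
    simp only [List.foldl_append, List.foldl_cons]
    rw [run_in seg hnomark]
    have hstep : stepA ⟨h, trailer, chunks, true, [b] ++ seg, List.foldl findEvent none seg⟩ m =
        ⟨h, trailer, chunks, true, [m], none⟩ := by
      simp [stepA, hb]
    rw [hstep, goB.eq_def]
    split
    next hs1 => rw [hsplit] at hs1; simp_all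
    next sx mx rx hs1 =>
      rw [hsplit] at hs1
      simp only [Prod.mk.injEq, Option.some.injEq] at hs1
      obtain ⟨g1, g2, g3⟩ := hs1
      subst g1; subst g2; subst g3
      have hnE2 : (PySem.Str.strip m == endMark) = false := by simpa using hnE
      simp only [hnE2, Bool.false_eq_true, if_false]
      exact ih h hstray2


-- ===== tightness: inside D_ the chunk counts differ =====

def countEnd : List String → Nat
  | [] => 0
  | l :: ls => (if PySem.Str.strip l == endMark then 1 else 0) + countEnd ls

def matchedEnd : List String → Bool → Nat
  | [], _ => 0
  | l :: ls, inC =>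
    if PySem.Str.strip l == beginMark then matchedEnd ls true
    else if PySem.Str.strip l == endMark then
      (if inC then 1 else 0) + matchedEnd ls false
    else matchedEnd ls inC

theorem strip_begin_ne_end {x : String} (h : (PySem.Str.strip x == beginMark) = true) :
    (PySem.Str.strip x == endMark) = false := by
  have hx : PySem.Str.strip x = beginMark := by simpa using h
  simp [hx, beginMark, endMark]

theorem chunksA_len (ls : List String) :
    ∀ s : AState, (List.foldl stepA s ls).chunks.length = s.chunks.length + countEnd ls := by
  induction ls with
  | nil => intro s; simp [countEnd]
  | cons x xs ih =>
    intro s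
    simp only [List.foldl_cons]
    rw [ih]
    by_cases h1 : (PySem.Str.strip x == beginMark) = true
    · have h2 := strip_begin_ne_end h1
      simp [stepA, h1, h2, countEnd]
    · by_cases h2 : (PySem.Str.strip x == endMark) = true
      · simp [stepA, h1, h2, countEnd]; omega
      · have hc : (stepA s x).chunks = s.chunks := by
          simp only [stepA, h1, h2, Bool.false_eq_true, if_false]
          split_ifs <;> rfl
        simp [hc, countEnd, h2]

theorem matched_append_markerless (seg ys : List String) (c : Bool)
    (h : ∀ x ∈ seg, isMarkerLine x = false) :
    matchedEnd (seg ++ ys) c = matchedEnd ys c := by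
  induction seg with
  | nil => simp
  | cons x xs ih =>
    have hx := h x (List.mem_cons_self ..)
    simp only [isMarkerLine, Bool.or_eq_false_iff] at hx
    simp only [List.cons_append, matchedEnd, hx.1, hx.2, Bool.false_eq_true, ite_false]
    exact ih (fun y hy => h y (List.mem_cons_of_mem _ hy))

theorem matched_append_noBegin (seg ys : List String)
    (h : ∀ x ∈ seg, isBeginLine x = false) :
    matchedEnd (seg ++ ys) false = matchedEnd ys false := by
  induction seg with
  | nil => simp
  | cons x xs ih =>
    have hx := h x (List.mem_cons_self ..)
    have hnb : (PySem.Str.strip x == beginMark) = false := by simpa [isBeginLine] using hx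
    have ih' := ih (fun y hy => h y (List.mem_cons_of_mem _ hy))
    by_cases he : (PySem.Str.strip x == endMark) = true
    · simpa [matchedEnd, hnb, he] using ih'
    · simpa [matchedEnd, hnb, he] using ih'

theorem matched_le (ls : List String) : ∀ c, matchedEnd ls c ≤ countEnd ls := by
  induction ls with
  | nil => intro c; simp [matchedEnd, countEnd]
  | cons x xs ih =>
    intro c
    by_cases h1 : (PySem.Str.strip x == beginMark) = true
    · have h2 := strip_begin_ne_end h1
      have := ih true
      simp [matchedEnd, countEnd, h1, h2]; omega
    · by_cases h2 : (PySem.Str.strip x == endMark) = true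
      · have := ih false
        cases c <;> simp [matchedEnd, countEnd, h1, h2] <;> omega
      · have := ih c
        simp [matchedEnd, countEnd, h1, h2]; omega

theorem stray_lt (ls : List String) :
    ∀ c, strayEndScan ls c = true → matchedEnd ls c < countEnd ls := by
  induction ls with
  | nil => intro c h; simp [strayEndScan] at h
  | cons x xs ih =>
    intro c h
    by_cases h1 : (PySem.Str.strip x == beginMark) = true
    · have h2 := strip_begin_ne_end h1
      have hs : strayEndScan xs true = true := by simpa [strayEndScan, h1] using h
      have := ih true hs
      simp [matchedEnd, countEnd, h1, h2]; omega
    · by_cases h2 : (PySem.Str.strip x == endMark) = true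
      · cases c with
        | false =>
          have := matched_le xs false
          simp [matchedEnd, countEnd, h1, h2]; omega
        | true =>
          have hs : strayEndScan xs false = true := by simpa [strayEndScan, h1, h2] using h
          have := ih false hs
          simp [matchedEnd, countEnd, h1, h2]; omega
      · have hs : strayEndScan xs c = true := by simpa [strayEndScan, h1, h2] using h
        have := ih c hs
        simp [matchedEnd, countEnd, h1, h2]; omega

theorem goB_len : ∀ (b : String) (rest : List String) (chunks : List (Int × List String))
    (trailer : List String),
    (goB b rest chunks trailer).1.length = chunks.length + matchedEnd rest true := by
  intro b rest chunks trailer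
  induction b, rest, chunks, trailer using goB.induct with
  | case1 b rest chunks trailer seg hsplit =>
    obtain ⟨_, hnomark⟩ := splitAtPred_none hsplit
    have hm : matchedEnd rest true = 0 := by
      have := matched_append_markerless rest [] true hnomark
      simpa [matchedEnd] using this
    rw [goB.eq_def]
    split
    next hs1 => simp [hm]
    next sx mx rx hs1 => rw [hsplit] at hs1; simp_all
  | case2 b rest chunks trailer seg m rest2 hsplit hlen hE seg2 hsplit2 =>
    obtain ⟨hrest, hnomark, _⟩ := splitAtPred_some hsplit
    subst hrest
    have hnb : (PySem.Str.strip m == beginMark) = false := by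
      have heq : PySem.Str.strip m = endMark := by simpa using hE
      simp [heq, endMark, beginMark]
    obtain ⟨hr2, hnb2⟩ := splitAtPred_none hsplit2
    have hm0 : matchedEnd rest2 false = 0 := by
      have := matched_append_noBegin rest2 [] hnb2
      simpa [matchedEnd] using this
    have hm : matchedEnd (seg ++ m :: rest2) true = 1 := by
      rw [matched_append_markerless seg _ true hnomark]
      simp [matchedEnd, hnb, hE, hm0]
    rw [goB.eq_def]
    split
    next hs1 => rw [hsplit] at hs1; simp_all
    next sx mx rx hs1 =>
      rw [hsplit] at hs1
      simp only [Prod.mk.injEq, Option.some.injEq] at hs1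
      obtain ⟨g1, g2, g3⟩ := hs1
      subst g1; subst g2; subst g3
      simp only [hE, if_true]
      split
      next hs2 => simp [hm]
      next hs2 => rw [hsplit2] at hs2; simp_all
  | case3 b rest chunks trailer seg m rest2 hsplit hlen hE chunks' seg2 b2 rest3 hsplit2 hlen2 ih =>
    obtain ⟨hrest, hnomark, _⟩ := splitAtPred_some hsplit
    subst hrest
    have hnb : (PySem.Str.strip m == beginMark) = false := by
      have heq : PySem.Str.strip m = endMark := by simpa using hE
      simp [heq, endMark, beginMark]
    obtain ⟨hr2, hnb2, hb2⟩ := splitAtPred_some hsplit2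
    have hb2' : (PySem.Str.strip b2 == beginMark) = true := by
      simpa [isBeginLine] using hb2
    have hm : matchedEnd (seg ++ m :: rest2) true = 1 + matchedEnd rest3 true := by
      rw [matched_append_markerless seg _ true hnomark]
      have : matchedEnd rest2 false = matchedEnd rest3 true := by
        rw [hr2, matched_append_noBegin seg2 _ hnb2]
        simp [matchedEnd, hb2']
      simp [matchedEnd, hnb, hE, this]
    rw [goB.eq_def]
    split
    next hs1 => rw [hsplit] at hs1; simp_all
    next sx mx rx hs1 =>
      rw [hsplit] at hs1
      simp only [Prod.mk.injEq, Option.some.injEq] at hs1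
      obtain ⟨g1, g2, g3⟩ := hs1
      subst g1; subst g2; subst g3
      simp only [hE, if_true]
      split
      next hs2 => rw [hsplit2] at hs2; simp_all
      next sx2 mx2 rx2 hs2 =>
        rw [hsplit2] at hs2
        simp only [Prod.mk.injEq, Option.some.injEq] at hs2
        obtain ⟨g1, g2, g3⟩ := hs2
        subst g1; subst g2; subst g3
        have hih : (goB b2 rest3 (chunks ++ [(eventNum seg, b :: (seg ++ [m]))])
            (trailer ++ seg2)).1.length
            = (chunks ++ [(eventNum seg, b :: (seg ++ [m]))]).length
              + matchedEnd rest3 true := ih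
        rw [hih]
        simp [hm]
        omega
  | case4 b rest chunks trailer seg m rest2 hsplit hlen hnE ih =>
    obtain ⟨hrest, hnomark, hm⟩ := splitAtPred_some hsplit
    subst hrest
    have hb : (PySem.Str.strip m == beginMark) = true := by
      simp only [isMarkerLine, Bool.or_eq_true] at hm
      rcases hm with hbm | he
      · exact hbm
      · exact absurd he (by simpa using hnE)
    have hmm : matchedEnd (seg ++ m :: rest2) true = matchedEnd rest2 true := by
      rw [matched_append_markerless seg _ true hnomark]
      simp [matchedEnd, hb]
    rw [goB.eq_def]
    split
    next hs1 => rw [hsplit] at hs1; simp_all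
    next sx mx rx hs1 =>
      rw [hsplit] at hs1
      simp only [Prod.mk.injEq, Option.some.injEq] at hs1
      obtain ⟨g1, g2, g3⟩ := hs1
      subst g1; subst g2; subst g3
      have hnE2 : (PySem.Str.strip m == endMark) = false := by simpa using hnE
      simp only [hnE2, Bool.false_eq_true, if_false]
      rw [ih, hmm]

theorem lenA (ls : List String) : (parse_stream ls).2.1.length = countEnd ls := by
  have := chunksA_len ls ⟨[], [], [], false, [], none⟩
  simpa [parse_stream] using this

theorem lenB (ls : List String) : (parse_stream_alt ls).2.1.length = matchedEnd ls false := by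
  unfold parse_stream_alt
  rcases hsp : splitAtBegin ls with ⟨hdr, _ | ⟨b, rest⟩⟩
  · obtain ⟨hh, hnb⟩ := splitAtPred_none hsp
    subst hh
    have : matchedEnd hdr false = 0 := by
      have := matched_append_noBegin hdr [] hnb
      simpa [matchedEnd] using this
    simp [this]
  · obtain ⟨hls, hnb, hbm⟩ := splitAtPred_some hsp
    have hb' : (PySem.Str.strip b == beginMark) = true := by simpa [isBeginLine] using hbm
    have hm : matchedEnd ls false = matchedEnd rest true := by
      rw [hls, matched_append_noBegin hdr _ hnb]
      simp [matchedEnd, hb']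
    simp [goB_len, hm]

-- ===== VERDICT (by name: the statement is the Claim_ definition above) =====
theorem parse_stream_spec : Claim_unchanged_parse_stream := by
  unfold Claim_unchanged_parse_stream
  intro ls _ _ hnd
  have hstray : strayEndScan ls false = false := by
    unfold D_parse_stream at hnd
    exact Bool.not_eq_true _ ▸ (by simpa using hnd)
  show parse_stream ls = parse_stream_alt ls
  rcases hsp : splitAtBegin ls with ⟨hdr, _ | ⟨b, rest⟩⟩
  · obtain ⟨hh, _⟩ := splitAtPred_none hsp
    subst hh
    have hnomark := splitAtBegin_markerless hstray hsp
    have hA : parse_stream hdr = (hdr, [], []) := by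
      unfold parse_stream
      rw [run_hdr hdr hnomark [] none]
      simp
    have hB : parse_stream_alt hdr = (hdr, [], []) := by
      unfold parse_stream_alt
      rw [hsp]
    rw [hA, hB]
  · obtain ⟨hls, _, hb⟩ := splitAtPred_some hsp
    have hnomark := splitAtBegin_markerless hstray hsp
    have hb' : (PySem.Str.strip b == beginMark) = true := by simpa [isBeginLine] using hb
    have hstray2 : strayEndScan rest true = false := by
      rw [hls, stray_append hdr _ hnomark] at hstray
      simpa [strayEndScan, hb'] using hstray
    have hmain := goB_spec b rest [] [] hdr hstray2
    have hA : parse_stream ls = (hdr, (goB b rest [] []).1, (goB b rest [] []).2) := by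
      unfold parse_stream
      conv_lhs => rw [hls]
      rw [List.foldl_append, run_hdr hdr hnomark [] none, List.foldl_cons]
      have hstep : stepA ⟨[] ++ hdr, [], [], false, [], none⟩ b =
          ⟨hdr, [], [], true, [b], none⟩ := by
        simp [stepA, hb']
      rw [hstep]
      simpa using hmain
    have hB : parse_stream_alt ls = (hdr, (goB b rest [] []).1, (goB b rest [] []).2) := by
      unfold parse_stream_alt
      rw [hsp]
    rw [hA, hB]

theorem parse_stream_changed : Claim_changed_parse_stream := by
  unfold Claim_changed_parse_stream; decide

theorem parse_stream_tight : Claim_exact_parse_stream := by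
  unfold Claim_exact_parse_stream
  intro ls _ _ hD heq
  have h1 := lenA ls
  have h2 := lenB ls
  have hlt := stray_lt ls false hD
  rw [heq, h2] at h1
  omega
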